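-- pv_equiv track=rewrite | github.com/brandoneng000/LeetCode | medium/2289.py | totalSteps
-- ===== SOURCE A (Python) =====
-- from typing import List
--
-- def totalSteps(nums: List[int]) -> int:
--     n = len(nums)
--     dp = [0] * n
--     stack = []
--
--     for i, num in enumerate(nums):
--         cur = 0
--
--         while stack and num >= nums[stack[-1]]:
--             cur = max(cur, dp[stack.pop()])
--
--         if stack:
--             dp[i] = cur + 1
--
--         stack.append(i)
--
--     return max(dp)
-- ===== SOURCE B (Python) =====
-- def totalSteps(nums):
--     # direct DP: dp[i] = 1 + max dp strictly between the previous greater element and i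
--     n = len(nums)
--     dp = [0] * n
--     for i in range(n):
--         j = i - 1
--         while j >= 0 and nums[j] <= nums[i]:
--             j -= 1
--         if j >= 0:
--             dp[i] = max(dp[j + 1:i], default=0) + 1
--     return max(dp)
-- ===== Notes on version B (the rewrite author's own statement) =====
-- stated objective: simpler
-- what changed: Replaces the monotonic-stack bookkeeping with a direct dp recurrence: for each index scan left to the previous strictly greater element and take 1 + max dp strictly in between (no stack, no pop loop).
-- outside the precondition, e.g. on totalSteps([]): A raises ValueError, B raises ValueError
import Mathlib
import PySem

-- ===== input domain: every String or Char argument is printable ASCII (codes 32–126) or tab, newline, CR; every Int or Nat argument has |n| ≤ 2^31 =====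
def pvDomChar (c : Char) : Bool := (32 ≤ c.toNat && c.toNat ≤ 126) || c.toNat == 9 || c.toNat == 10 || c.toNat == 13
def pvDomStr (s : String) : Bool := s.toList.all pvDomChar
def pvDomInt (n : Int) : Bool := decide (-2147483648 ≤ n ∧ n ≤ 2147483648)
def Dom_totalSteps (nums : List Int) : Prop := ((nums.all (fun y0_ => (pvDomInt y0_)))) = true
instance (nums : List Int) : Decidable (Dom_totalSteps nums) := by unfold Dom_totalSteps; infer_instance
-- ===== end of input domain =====

-- B replaces A's monotonic-stack DP by a direct previous-greater-element recurrence (simpler structure, not faster).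


-- ===== PORT A =====
-- Python's stack is kept with its TOP at the HEAD of the list (Python appends/pops at the end).
-- All Python indexings (nums[i], nums[stack[-1]], dp[stack.pop()]) use indices that are in range, so getD is exact.
def popLoopA (nums dp : List Int) (num : Int) : Int → List Nat → Int × List Nat
  | cur, [] => (cur, [])
  | cur, t :: rest =>
      if nums.getD t 0 ≤ num then popLoopA nums dp num (max cur (dp.getD t 0)) rest
      else (cur, t :: rest)

def stepA (nums : List Int) (st : List Int × List Nat) (i : Nat) : List Int × List Nat :=
  let num := nums.getD i 0
  let res := popLoopA nums st.1 num 0 st.2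
  let dp' := if res.2 = [] then st.1 else st.1.set i (res.1 + 1)
  (dp', i :: res.2)

def totalSteps (nums : List Int) : Int :=
  let n := nums.length
  let st := (List.range n).foldl (stepA nums) (List.replicate n (0 : Int), ([] : List Nat))
  (PySem.List.max? st.1 (fun x => x)).getD 0   -- max(dp); Pre_ excludes [], where Python raises ValueError

-- ===== PORT B =====
-- 'while j >= 0 and nums[j] <= nums[i]: j -= 1' — recursion on j (none = fell off the left end)
def prevGreaterB (nums : List Int) (num : Int) : Nat → Option Nat
  | 0 => none
  | j + 1 => if nums.getD j 0 ≤ num then prevGreaterB nums num j else some j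

def stepB (nums : List Int) (dp : List Int) (i : Nat) : List Int :=
  match prevGreaterB nums (nums.getD i 0) i with
  | none => dp
  | some j =>
      dp.set i ((PySem.List.max? (PySem.List.slice dp (some ((j : Int) + 1)) (some (i : Int))) (fun x => x)).getD 0 + 1)

def totalSteps_alt (nums : List Int) : Int :=
  let n := nums.length
  let dp := (List.range n).foldl (stepB nums) (List.replicate n (0 : Int))
  (PySem.List.max? dp (fun x => x)).getD 0

-- ===== PRECONDITION & SPEC =====
-- Pre_ excludes only the empty list, on which Python's max([]) raises ValueError in both A and B.
def Pre_totalSteps (nums : List Int) : Prop := nums ≠ []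
instance (nums : List Int) : Decidable (Pre_totalSteps nums) := by unfold Pre_totalSteps; infer_instance
def pvWitness_totalSteps : List Int := ([5, 3, 4, 4, 7, 3, 6, 11, 8, 5, 11] : List Int)

def Spec_totalSteps (nums : List Int) (out : Int) : Prop := out = totalSteps_alt nums
instance (nums : List Int) (out : Int) : Decidable (Spec_totalSteps nums out) := by unfold Spec_totalSteps; infer_instance

-- ===== CLAIM (what is proved, stated in full; the proofs are below) =====
def Claim_equal_totalSteps : Prop := ∀ (nums : List Int), Dom_totalSteps nums → Pre_totalSteps nums → Spec_totalSteps nums (totalSteps nums)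

-- ===== LEMMAS AND PROOFS =====

-- state of A's fold after t steps
def foldA (nums : List Int) (t : Nat) : List Int × List Nat :=
  (List.range t).foldl (stepA nums) (List.replicate nums.length (0 : Int), ([] : List Nat))

-- state of B's fold after t steps
def foldB (nums : List Int) (t : Nat) : List Int :=
  (List.range t).foldl (stepB nums) (List.replicate nums.length (0 : Int))

-- the final value of dp entry m (it is written at most once, at step m)
def dval (nums : List Int) (m : Nat) : Int := (foldB nums (m + 1)).getD m 0

-- k survives A's first t steps on the stack: nothing after it up to t is ≥ it
def visible (nums : List Int) (t k : Nat) : Prop :=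
  k < t ∧ ∀ m, k < m → m < t → nums.getD m 0 < nums.getD k 0

-- the pop test of step t, as a Bool predicate on stack entries
def pbf (nums : List Int) (t : Nat) : Nat → Bool := fun k => decide (nums.getD k 0 ≤ nums.getD t 0)

theorem foldA_succ (nums : List Int) (t : Nat) :
    foldA nums (t + 1) = stepA nums (foldA nums t) t := by
  simp [foldA, List.range_succ]

theorem foldB_succ (nums : List Int) (t : Nat) :
    foldB nums (t + 1) = stepB nums (foldB nums t) t := by
  simp [foldB, List.range_succ]

theorem popLoopA_eq (nums dp : List Int) (num : Int) (s : List Nat) (cur : Int) :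
    popLoopA nums dp num cur s =
      ((s.takeWhile (fun k => decide (nums.getD k 0 ≤ num))).foldl (fun c k => max c (dp.getD k 0)) cur,
       s.dropWhile (fun k => decide (nums.getD k 0 ≤ num))) := by
  induction s generalizing cur with
  | nil => simp [popLoopA]
  | cons a s ih =>
      by_cases h : nums.getD a 0 ≤ num
      · rw [List.takeWhile_cons_of_pos (by simpa using h), List.dropWhile_cons_of_pos (by simpa using h)]
        simp only [popLoopA, if_pos h, ih, List.foldl_cons]
      · rw [List.takeWhile_cons_of_neg (by simpa using h), List.dropWhile_cons_of_neg (by simpa using h)]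
        simp only [popLoopA, if_neg h, List.foldl_nil]

theorem getD_set_ne (l : List Int) (i j : Nat) (v : Int) (h : i ≠ j) :
    (l.set i v).getD j 0 = l.getD j 0 := by
  simp [List.getD_eq_getElem?_getD, List.getElem?_set_ne h]

theorem getD_set_self (l : List Int) (i : Nat) (v : Int) (h : i < l.length) :
    (l.set i v).getD i 0 = v := by
  simp [List.getD_eq_getElem?_getD, List.getElem?_set_self h]

theorem length_foldB (nums : List Int) (t : Nat) : (foldB nums t).length = nums.length := by
  induction t with
  | zero => simp [foldB]
  | succ t ih =>
      rw [foldB_succ]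
      unfold stepB
      cases prevGreaterB nums (nums.getD t 0) t <;> simp [ih]

theorem foldB_getD_lt (nums : List Int) (t m : Nat) (h : m < t) :
    (foldB nums t).getD m 0 = dval nums m := by
  induction t with
  | zero => omega
  | succ t ih =>
      rcases Nat.lt_or_ge m t with h' | h'
      · rw [foldB_succ]
        unfold stepB
        cases prevGreaterB nums (nums.getD t 0) t with
        | none => exact ih h'
        | some j => rw [getD_set_ne _ _ _ _ (by omega)]; exact ih h'
      · have : m = t := by omega
        subst this
        rfl

theorem getD_nonneg_of_forall {xs : List Int} (h : ∀ v ∈ xs, 0 ≤ v) (m : Nat) :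
    0 ≤ xs.getD m 0 := by
  rcases Nat.lt_or_ge m xs.length with hm | hm
  · rw [List.getD_eq_getElem _ _ hm]; exact h _ (List.getElem_mem hm)
  · rw [List.getD_eq_default _ _ hm]

theorem foldB_mem_nonneg (nums : List Int) (t : Nat) : ∀ v ∈ foldB nums t, 0 ≤ v := by
  induction t with
  | zero => intro v hv; simp [foldB] at hv; omega
  | succ t ih =>
      rw [foldB_succ]
      unfold stepB
      cases hpg : prevGreaterB nums (nums.getD t 0) t with
      | none => exact ih
      | some j =>
          intro v hv
          rcases List.mem_or_eq_of_mem_set hv with hv' | hv'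
          · exact ih v hv'
          · subst hv'
            have h0 : (0:Int) ≤ (PySem.List.max? (PySem.List.slice (foldB nums t) (some ((j : Int) + 1)) (some (t : Int))) (fun x => x)).getD 0 := by
              cases hmx : PySem.List.max? (PySem.List.slice (foldB nums t) (some ((j : Int) + 1)) (some (t : Int))) (fun x => x) with
              | none => simp
              | some mx =>
                  have hmem := PySem.List.max?_mem hmx
                  have := PySem.List.mem_of_mem_slice _ _ _ hmem
                  simpa using ih _ this
            omega

theorem prevGreaterB_none (nums : List Int) (num : Int) (i : Nat) :
    prevGreaterB nums num i = none ↔ ∀ j, j < i → nums.getD j 0 ≤ num := by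
  induction i with
  | zero => simp [prevGreaterB]
  | succ i ih =>
      unfold prevGreaterB
      by_cases h : nums.getD i 0 ≤ num
      · rw [if_pos h, ih]
        constructor
        · intro H j hj
          rcases Nat.lt_or_ge j i with hj' | hj'
          · exact H j hj'
          · have : j = i := by omega
            subst this; exact h
        · intro H j hj; exact H j (by omega)
      · rw [if_neg h]
        constructor
        · intro H; cases H
        · intro H; exact absurd (H i (by omega)) h

theorem prevGreaterB_some (nums : List Int) (num : Int) (i j : Nat) :
    prevGreaterB nums num i = some j ↔
      (j < i ∧ num < nums.getD j 0 ∧ ∀ m, j < m → m < i → nums.getD m 0 ≤ num) := by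
  induction i with
  | zero =>
      simp only [prevGreaterB]
      constructor
      · intro h; cases h
      · rintro ⟨h1, _, _⟩; omega
  | succ i ih =>
      unfold prevGreaterB
      by_cases h : nums.getD i 0 ≤ num
      · rw [if_pos h, ih]
        constructor
        · rintro ⟨h1, h2, h3⟩
          refine ⟨by omega, h2, fun m hm hm' => ?_⟩
          rcases Nat.lt_or_ge m i with hmi | hmi
          · exact h3 m hm hmi
          · have : m = i := by omega
            subst this; exact h
        · rintro ⟨h1, h2, h3⟩
          have hji : j ≠ i := by rintro rfl; omega
          exact ⟨by omega, h2, fun m hm hm' => h3 m hm (by omega)⟩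
      · rw [if_neg h]
        constructor
        · intro h'
          injection h' with h'
          subst h'
          exact ⟨by omega, by omega, fun m hm hm' => by omega⟩
        · rintro ⟨h1, h2, h3⟩
          have : j = i := by
            by_contra hne
            exact h (h3 i (by omega) (by omega))
          rw [this]

theorem getD_mem_slice {xs : List Int} {a b m : Nat} (h1 : a ≤ m) (h2 : m < b)
    (h3 : m < xs.length) : xs.getD m 0 ∈ (xs.drop a).take (b - a) := by
  have hlen : m - a < ((xs.drop a).take (b - a)).length := by
    simp only [List.length_take, List.length_drop]
    omega
  have he : ((xs.drop a).take (b - a))[m - a] = xs[m] := by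
    rw [List.getElem_take, List.getElem_drop]
    congr 1
    omega
  rw [List.getD_eq_getElem _ _ h3, ← he]
  exact List.getElem_mem hlen

theorem mem_slice_exists {xs : List Int} {a b : Nat} {v : Int}
    (h : v ∈ (xs.drop a).take (b - a)) :
    ∃ m, a ≤ m ∧ m < b ∧ m < xs.length ∧ v = xs.getD m 0 := by
  rcases List.getElem_of_mem h with ⟨k, hk, hv⟩
  have h1 : k < b - a := by
    have := hk; simp only [List.length_take, List.length_drop] at this; omega
  have h2 : a + k < xs.length := by
    have := hk; simp only [List.length_take, List.length_drop] at this; omega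
  refine ⟨a + k, by omega, by omega, h2, ?_⟩
  rw [← hv, List.getElem_take, List.getElem_drop, List.getD_eq_getElem _ _ h2]

theorem foldl_max_le {s : List Nat} {dpv : Nat → Int} {init c : Int}
    (h0 : init ≤ c) (h : ∀ x ∈ s, dpv x ≤ c) :
    s.foldl (fun a x => max a (dpv x)) init ≤ c := by
  induction s generalizing init with
  | nil => exact h0
  | cons a s ih =>
      simp only [List.foldl_cons]
      refine ih ?_ (fun x hx => h x (by simp [hx]))
      have := h a (by simp)
      simp only [max_le_iff]
      exact ⟨h0, this⟩

-- generic split of a strictly index-decreasing stack at its topmost failing element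
theorem stack_split {s : List Nat} {pb : Nat → Bool} {x : Nat}
    (hps : s.Pairwise (fun a b => b < a)) (hx : x ∈ s) (hpx : pb x = false)
    (hgt : ∀ y ∈ s, x < y → pb y = true) :
    s.takeWhile pb = s.filter (fun y => decide (x < y)) ∧
    ∃ tl, s.dropWhile pb = x :: tl := by
  induction s with
  | nil => cases hx
  | cons a s ih =>
      rcases List.pairwise_cons.mp hps with ⟨ha, hps'⟩
      rcases List.mem_cons.mp hx with rfl | hx'
      · constructor
        · rw [List.takeWhile_cons_of_neg (by simp [hpx]), List.filter_cons_of_neg (by simp)]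
          symm
          rw [List.filter_eq_nil_iff]
          intro y hy
          have := ha y hy
          simp only [decide_eq_true_eq]
          omega
        · exact ⟨s, List.dropWhile_cons_of_neg (by simp [hpx])⟩
      · have hax : x < a := ha x hx'
        have hpa : pb a = true := hgt a (by simp) hax
        rcases ih hps' hx' (fun y hy hlt => hgt y (by simp [hy]) hlt) with ⟨h1, tl, h2⟩
        constructor
        · rw [List.takeWhile_cons_of_pos hpa, List.filter_cons_of_pos (by simp [hax]), h1]
        · exact ⟨tl, by rw [List.dropWhile_cons_of_pos hpa, h2]⟩

-- every element surviving the pops of step t has value > nums[t], given values strictly increase down the stack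
theorem dropWhile_gt (nums : List Int) (t : Nat) {s : List Nat}
    (hps : s.Pairwise (fun a b => nums.getD a 0 < nums.getD b 0)) :
    ∀ z ∈ s.dropWhile (pbf nums t), nums.getD t 0 < nums.getD z 0 := by
  induction s with
  | nil => simp
  | cons a s ih =>
      rcases List.pairwise_cons.mp hps with ⟨ha, hps'⟩
      by_cases h : nums.getD a 0 ≤ nums.getD t 0
      · rw [List.dropWhile_cons_of_pos (show pbf nums t a = true by
          simp only [pbf, decide_eq_true_eq]; exact h)]
        exact ih hps'
      · rw [List.dropWhile_cons_of_neg (show ¬ pbf nums t a = true by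
          simp only [pbf, decide_eq_true_eq]; exact h)]
        intro z hz
        rcases List.mem_cons.mp hz with rfl | hz'
        · omega
        · have := ha z hz'
          omega

-- the greatest index below t whose value exceeds num, given one exists
theorem exists_greatest (nums : List Int) (num : Int) (t j : Nat) (hj : j < t)
    (hgt : num < nums.getD j 0) :
    ∃ jg, jg < t ∧ num < nums.getD jg 0 ∧ ∀ m, jg < m → m < t → nums.getD m 0 ≤ num := by
  refine ⟨Nat.findGreatest (fun k => num < nums.getD k 0) (t - 1), ?_, ?_, ?_⟩
  · have hle := Nat.findGreatest_le (P := fun k => num < nums.getD k 0) (n := t - 1)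
    omega
  · exact Nat.findGreatest_spec (P := fun k => num < nums.getD k 0) (n := t - 1) (m := j)
      (by omega) hgt
  · intro m hm1 hm2
    by_contra hc
    push_neg at hc
    exact absurd hc
      (Nat.findGreatest_is_greatest (P := fun k => num < nums.getD k 0) (n := t - 1) hm1 (by omega))

-- dominance: an element removed before step i is dominated (in dval) by a still-visible later element,
-- provided some jm < m towers over everything in (jm, i)
theorem dominance (nums : List Int) (i : Nat) (hi : i ≤ nums.length) :
    ∀ fuel m jm, i - m ≤ fuel → jm < m → m < i →
      (∀ q, jm < q → q < i → nums.getD q 0 < nums.getD jm 0) →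
      ¬ visible nums i m →
      ∃ k, m < k ∧ k < i ∧ visible nums i k ∧ dval nums m < dval nums k := by
  intro fuel
  induction fuel with
  | zero => intro m jm hf hm1 hm2 _ _; omega
  | succ fuel ih =>
      intro m jm hf hm1 hm2 hjm hnv
      have hex : ∃ p, m < p ∧ p < i ∧ nums.getD m 0 ≤ nums.getD p 0 := by
        unfold visible at hnv
        push_neg at hnv
        rcases hnv hm2 with ⟨p, hp1, hp2, hp3⟩
        exact ⟨p, hp1, hp2, by omega⟩
      classical
      have hfind := Nat.find_spec hex
      obtain ⟨hp1, hp2, hp3⟩ := hfind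
      have hmid : ∀ q, m < q → q < Nat.find hex → nums.getD q 0 < nums.getD m 0 := by
        intro q hq1 hq2
        by_contra hc
        push_neg at hc
        exact Nat.find_min hex hq2 ⟨hq1, by omega, hc⟩
      have hnum : nums.getD (Nat.find hex) 0 < nums.getD jm 0 := hjm _ (by omega) hp2
      have hpgne : prevGreaterB nums (nums.getD (Nat.find hex) 0) (Nat.find hex) ≠ none := by
        intro hcon
        rw [prevGreaterB_none] at hcon
        have := hcon jm (by omega)
        omega
      rcases hjp : prevGreaterB nums (nums.getD (Nat.find hex) 0) (Nat.find hex) with _ | jp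
      · exact absurd hjp hpgne
      rcases (prevGreaterB_some nums _ _ jp).mp hjp with ⟨hjp1, hjp2, hjp3⟩
      have hjpm : jp < m := by
        by_contra hc
        push_neg at hc
        rcases Nat.eq_or_lt_of_le hc with heq | hlt
        · have := hjp2
          rw [← heq] at this
          omega
        · have := hmid jp hlt hjp1
          omega
      have hdp : dval nums m < dval nums (Nat.find hex) := by
        have hlhs : dval nums m = (foldB nums (Nat.find hex)).getD m 0 :=
          (foldB_getD_lt nums (Nat.find hex) m (by omega)).symm
        have hrhs : dval nums (Nat.find hex) =
            (stepB nums (foldB nums (Nat.find hex)) (Nat.find hex)).getD (Nat.find hex) 0 := by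
          unfold dval
          rw [foldB_succ]
        rw [hlhs, hrhs]
        unfold stepB
        rw [hjp]
        rw [getD_set_self _ _ _ (by rw [length_foldB]; omega)]
        have hcast : ((jp : Int) + 1) = (((jp + 1 : Nat)) : Int) := by push_cast; ring
        rw [hcast, PySem.List.slice_natCast]
        have hmem : (foldB nums (Nat.find hex)).getD m 0 ∈
            (((foldB nums (Nat.find hex)).drop (jp + 1)).take (Nat.find hex - (jp + 1))) :=
          getD_mem_slice (by omega) (by omega) (by rw [length_foldB]; omega)
        rcases hmx : PySem.List.max? (((foldB nums (Nat.find hex)).drop (jp + 1)).take (Nat.find hex - (jp + 1))) (fun x => x) with _ | mx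
        · rw [PySem.List.max?_eq_none_iff] at hmx
          rw [hmx] at hmem
          cases hmem
        · have hle := PySem.List.max?_isMax hmx _ hmem
          simp only [Option.getD_some]
          simp only at hle
          omega
      rcases Classical.em (visible nums i (Nat.find hex)) with hvp | hvp
      · exact ⟨Nat.find hex, by omega, hp2, hvp, hdp⟩
      · rcases ih (Nat.find hex) jm (by omega) (by omega) hp2 hjm hvp with ⟨k, hk1, hk2, hk3, hk4⟩
        exact ⟨k, by omega, hk2, hk3, by omega⟩

-- the combined invariant of the two folds
def InvAB (nums : List Int) (t : Nat) : Prop :=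
  (foldA nums t).1 = foldB nums t ∧
  (foldA nums t).2.Pairwise (fun a b => b < a ∧ nums.getD a 0 < nums.getD b 0) ∧
  (∀ k, k ∈ (foldA nums t).2 ↔ visible nums t k)

theorem inv_step (nums : List Int) (t : Nat) (ht : t < nums.length) (h : InvAB nums t) :
    InvAB nums (t + 1) := by
  obtain ⟨hdp, hpw, hmem⟩ := h
  have hpw1 : (foldA nums t).2.Pairwise (fun a b => b < a) := hpw.imp (fun h => h.1)
  have hpw2 : (foldA nums t).2.Pairwise (fun a b => nums.getD a 0 < nums.getD b 0) :=
    hpw.imp (fun h => h.2)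
  have hklt : ∀ k ∈ (foldA nums t).2, k < t := fun k hk => ((hmem k).mp hk).1
  have hstep : foldA nums (t + 1) =
      (if (foldA nums t).2.dropWhile (pbf nums t) = []
         then foldB nums t
         else (foldB nums t).set t
           (((foldA nums t).2.takeWhile (pbf nums t)).foldl
              (fun c k => max c ((foldB nums t).getD k 0)) 0 + 1),
       t :: (foldA nums t).2.dropWhile (pbf nums t)) := by
    rw [foldA_succ]
    show stepA nums (foldA nums t) t = _
    unfold stepA
    simp only [popLoopA_eq, hdp]
    rfl
  have hsdmem : ∀ z ∈ (foldA nums t).2.dropWhile (pbf nums t), z ∈ (foldA nums t).2 :=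
    fun z hz => (List.dropWhile_sublist _).subset hz
  have hsdgt : ∀ z ∈ (foldA nums t).2.dropWhile (pbf nums t), nums.getD t 0 < nums.getD z 0 :=
    dropWhile_gt nums t hpw2
  -- the stack part of the invariant, uniform in both cases
  have hstk_pw : (t :: (foldA nums t).2.dropWhile (pbf nums t)).Pairwise
      (fun a b => b < a ∧ nums.getD a 0 < nums.getD b 0) := by
    rw [List.pairwise_cons]
    exact ⟨fun z hz => ⟨hklt z (hsdmem z hz), hsdgt z hz⟩, hpw.sublist (List.dropWhile_sublist _)⟩
  have hstk_mem : ∀ k, k ∈ t :: (foldA nums t).2.dropWhile (pbf nums t) ↔ visible nums (t + 1) k := by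
    intro k
    constructor
    · intro hk
      rcases List.mem_cons.mp hk with rfl | hk'
      · exact ⟨by omega, fun m hm1 hm2 => by omega⟩
      · have hv : visible nums t k := (hmem k).mp (hsdmem k hk')
        have hkt := hv.1
        refine ⟨by omega, fun m hm1 hm2 => ?_⟩
        rcases Nat.lt_or_ge m t with hmt | hmt
        · exact hv.2 m hm1 hmt
        · have : m = t := by omega
          subst this
          exact hsdgt k hk'
    · rintro ⟨hk1, hk2⟩
      rcases Nat.eq_or_lt_of_le (Nat.lt_succ_iff.mp hk1) with rfl | hkt
      · exact List.mem_cons_self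
      · have hv : visible nums t k := ⟨hkt, fun m hm1 hm2 => hk2 m hm1 (by omega)⟩
        have hks : k ∈ (foldA nums t).2 := (hmem k).mpr hv
        have hpbk : pbf nums t k = false := by
          have := hk2 t hkt (by omega)
          simp only [pbf, decide_eq_false_iff_not]
          omega
        have hsplit : k ∈ (foldA nums t).2.takeWhile (pbf nums t) ++ (foldA nums t).2.dropWhile (pbf nums t) := by
          rw [List.takeWhile_append_dropWhile]; exact hks
        rcases List.mem_append.mp hsplit with h' | h'
        · have := List.mem_takeWhile_imp h'
          rw [hpbk] at this
          cases this
        · exact List.mem_cons_of_mem _ h'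
  -- the dp part
  rcases hsd : (foldA nums t).2.dropWhile (pbf nums t) with _ | ⟨z0, tl⟩
  · -- nothing survives the pops: B finds no previous greater element, both leave dp unchanged
    have hnone : prevGreaterB nums (nums.getD t 0) t = none := by
      rw [prevGreaterB_none]
      intro j hj
      by_contra hc
      push_neg at hc
      obtain ⟨jg, hjg_lt, hjg_gt, hjg_max⟩ := exists_greatest nums (nums.getD t 0) t j hj hc
      have hvg : visible nums t jg := ⟨hjg_lt, fun m hm1 hm2 => by
        have := hjg_max m hm1 hm2; omega⟩
      have hjgs : jg ∈ (foldA nums t).2 := (hmem jg).mpr hvg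
      have h1 : jg ∈ (foldA nums t).2.takeWhile (pbf nums t) ++ (foldA nums t).2.dropWhile (pbf nums t) := by
        rw [List.takeWhile_append_dropWhile]; exact hjgs
      rw [hsd, List.append_nil] at h1
      have := List.mem_takeWhile_imp h1
      simp only [pbf, decide_eq_true_eq] at this
      omega
    refine ⟨?_, ?_, ?_⟩
    · rw [hstep, hsd, if_pos rfl, foldB_succ]
      unfold stepB
      rw [hnone]
    · rw [hstep]
      exact hstk_pw
    · intro k
      rw [hstep]
      exact hstk_mem k
  · -- some survivor: its head is the previous greater element jg; values agree via dominance
    have hz0 : z0 ∈ (foldA nums t).2.dropWhile (pbf nums t) := by rw [hsd]; exact List.mem_cons_self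
    have hz0gt : nums.getD t 0 < nums.getD z0 0 := hsdgt z0 hz0
    have hz0lt : z0 < t := hklt z0 (hsdmem z0 hz0)
    obtain ⟨jg, hjg_lt, hjg_gt, hjg_max⟩ := exists_greatest nums (nums.getD t 0) t z0 hz0lt hz0gt
    have hvg : visible nums t jg := ⟨hjg_lt, fun m hm1 hm2 => by
      have := hjg_max m hm1 hm2; omega⟩
    have hjgs : jg ∈ (foldA nums t).2 := (hmem jg).mpr hvg
    have hpbjg : pbf nums t jg = false := by
      simp only [pbf, decide_eq_false_iff_not]; omega
    have hgtall : ∀ y ∈ (foldA nums t).2, jg < y → pbf nums t y = true := by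
      intro y hy hlt
      have hyt := hklt y hy
      have := hjg_max y hlt hyt
      simp only [pbf, decide_eq_true_eq]
      omega
    obtain ⟨htake, tl', hdrop⟩ := stack_split hpw1 hjgs hpbjg hgtall
    have hpg : prevGreaterB nums (nums.getD t 0) t = some jg :=
      (prevGreaterB_some nums _ t jg).mpr ⟨hjg_lt, hjg_gt, hjg_max⟩
    -- cur = max over popped stack entries = max over the whole dp slice (jg+1 .. t-1)
    have hlenB : (foldB nums t).length = nums.length := length_foldB nums t
    have hnonneg : ∀ v ∈ foldB nums t, 0 ≤ v := foldB_mem_nonneg nums t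
    have hMB0 : (0:Int) ≤ (PySem.List.max? (((foldB nums t).drop (jg + 1)).take (t - (jg + 1))) (fun x => x)).getD 0 := by
      rcases hmx : PySem.List.max? (((foldB nums t).drop (jg + 1)).take (t - (jg + 1))) (fun x => x) with _ | mx
      · simp
      · have hmm := PySem.List.max?_mem hmx
        obtain ⟨m, _, _, hm3, hv⟩ := mem_slice_exists hmm
        simp only [Option.getD_some]
        rw [hv]
        exact getD_nonneg_of_forall hnonneg m
    have hub : ∀ k ∈ (foldA nums t).2.filter (fun y => decide (jg < y)),
        (foldB nums t).getD k 0 ≤ (PySem.List.max? (((foldB nums t).drop (jg + 1)).take (t - (jg + 1))) (fun x => x)).getD 0 := by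
      intro k hk
      rcases List.mem_filter.mp hk with ⟨hks, hkgt⟩
      have hkgt' : jg < k := by simpa using hkgt
      have hkt : k < t := hklt k hks
      have hmemk : (foldB nums t).getD k 0 ∈ ((foldB nums t).drop (jg + 1)).take (t - (jg + 1)) :=
        getD_mem_slice (by omega) hkt (by omega)
      rcases hmx : PySem.List.max? (((foldB nums t).drop (jg + 1)).take (t - (jg + 1))) (fun x => x) with _ | mx
      · rw [PySem.List.max?_eq_none_iff] at hmx
        rw [hmx] at hmemk
        cases hmemk
      · have := PySem.List.max?_isMax hmx _ hmemk
        simp only [Option.getD_some]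
        simpa using this
    have hcur_le : ((foldA nums t).2.filter (fun y => decide (jg < y))).foldl
        (fun c k => max c ((foldB nums t).getD k 0)) 0 ≤
        (PySem.List.max? (((foldB nums t).drop (jg + 1)).take (t - (jg + 1))) (fun x => x)).getD 0 :=
      foldl_max_le hMB0 hub
    have hle_cur : (PySem.List.max? (((foldB nums t).drop (jg + 1)).take (t - (jg + 1))) (fun x => x)).getD 0 ≤
        ((foldA nums t).2.filter (fun y => decide (jg < y))).foldl
          (fun c k => max c ((foldB nums t).getD k 0)) 0 := by
      rcases hmx : PySem.List.max? (((foldB nums t).drop (jg + 1)).take (t - (jg + 1))) (fun x => x) with _ | mx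
      · simp only [Option.getD_none]
        exact (PySem.List.le_foldl_max_int _ _ 0).1
      · simp only [Option.getD_some]
        have hmm := PySem.List.max?_mem hmx
        obtain ⟨m, hm1, hm2, hm3, hv⟩ := mem_slice_exists hmm
        have hmlen : m < nums.length := by rwa [hlenB] at hm3
        have hget : ∀ k ∈ (foldA nums t).2, jg < k →
            (foldB nums t).getD k 0 ≤ ((foldA nums t).2.filter (fun y => decide (jg < y))).foldl
              (fun c k => max c ((foldB nums t).getD k 0)) 0 := by
          intro k hks hkgt
          exact (PySem.List.le_foldl_max_int _ _ 0).2 k (List.mem_filter.mpr ⟨hks, by simpa using hkgt⟩)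
        rcases Classical.em (visible nums t m) with hvm | hvm
        · have hms : m ∈ (foldA nums t).2 := (hmem m).mpr hvm
          rw [hv]
          exact hget m hms (by omega)
        · obtain ⟨k, hk1, hk2, hk3, hk4⟩ :=
            dominance nums t (by omega) (t - m) m jg (by omega) (by omega) hm2
              (fun q hq1 hq2 => by have := hjg_max q hq1 hq2; omega) hvm
          have hks : k ∈ (foldA nums t).2 := (hmem k).mpr hk3
          have hvm' : (foldB nums t).getD m 0 = dval nums m := foldB_getD_lt nums t m hm2
          have hvk : (foldB nums t).getD k 0 = dval nums k := foldB_getD_lt nums t k hk2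
          have := hget k hks (by omega)
          rw [hv, hvm']
          omega
    have hcurMB : ((foldA nums t).2.filter (fun y => decide (jg < y))).foldl
        (fun c k => max c ((foldB nums t).getD k 0)) 0 =
        (PySem.List.max? (((foldB nums t).drop (jg + 1)).take (t - (jg + 1))) (fun x => x)).getD 0 :=
      le_antisymm hcur_le hle_cur
    refine ⟨?_, ?_, ?_⟩
    · rw [hstep, hdrop, if_neg (by simp), foldB_succ]
      unfold stepB
      rw [hpg, htake, hcurMB]
      have hslice : PySem.List.slice (foldB nums t) (some ((jg : Int) + 1)) (some (t : Int)) =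
          ((foldB nums t).drop (jg + 1)).take (t - (jg + 1)) := by
        have hcast : ((jg : Int) + 1) = (((jg + 1 : Nat)) : Int) := by push_cast; ring
        rw [hcast, PySem.List.slice_natCast]
      show (foldB nums t).set t
          ((PySem.List.max? (((foldB nums t).drop (jg + 1)).take (t - (jg + 1))) (fun x => x)).getD 0 + 1) =
        (foldB nums t).set t
          ((PySem.List.max? (PySem.List.slice (foldB nums t) (some ((jg : Int) + 1)) (some (t : Int))) (fun x => x)).getD 0 + 1)
      rw [hslice]
    · rw [hstep]
      exact hstk_pw
    · intro k
      rw [hstep]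
      exact hstk_mem k
  
theorem inv_all (nums : List Int) (t : Nat) (ht : t ≤ nums.length) : InvAB nums t := by
  induction t with
  | zero =>
      refine ⟨rfl, ?_, ?_⟩
      · simp [foldA]
      · intro k; simp [foldA, visible]
  | succ t ih => exact inv_step nums t (by omega) (ih (by omega))

-- ===== VERDICT (by name: the statement is the Claim_ definition above) =====
theorem totalSteps_spec : Claim_equal_totalSteps := by
  intro nums _ _
  show totalSteps nums = totalSteps_alt nums
  have h := (inv_all nums nums.length (le_refl _)).1
  unfold totalSteps totalSteps_alt
  show (PySem.List.max? (foldA nums nums.length).1 (fun x => x)).getD 0 =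
       (PySem.List.max? (foldB nums nums.length) (fun x => x)).getD 0
  rw [h]
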